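-- pv_equiv track=rewrite | github.com/yecemder/best-time-tracker | pdf_to_csv.py | fixDurationFormatting
-- ===== SOURCE A (Python) =====
-- def fixDurationFormatting(time: str):
--     t = list(time)
--     t.reverse()
--     out = ['', '', ':', '', '', ':', '', '', '.', '', '']
--     out.reverse()
--
--     for i in range(len(out)):
--         if i>=len(t):
--             for j in range(i, len(out)):
--                 if out[j] == '':
--                     out[j] = '0'
--             break
--         out[i] = t[i]
--     return "".join(list(reversed(out)))
-- ===== SOURCE B (Python) =====
-- def fixDurationFormatting(time: str):
--     s = time[-11:]
--     return "00:00:00.00"[:11 - len(s)] + s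
-- ===== Notes on version B (the rewrite author's own statement) =====
-- stated objective: simpler
-- what changed: Replaces the reverse/index-loop/fill/re-reverse construction with a single slice of the input's last 11 characters right-justified against the constant template '00:00:00.00', whose prefix supplies the padding.
import Mathlib
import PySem

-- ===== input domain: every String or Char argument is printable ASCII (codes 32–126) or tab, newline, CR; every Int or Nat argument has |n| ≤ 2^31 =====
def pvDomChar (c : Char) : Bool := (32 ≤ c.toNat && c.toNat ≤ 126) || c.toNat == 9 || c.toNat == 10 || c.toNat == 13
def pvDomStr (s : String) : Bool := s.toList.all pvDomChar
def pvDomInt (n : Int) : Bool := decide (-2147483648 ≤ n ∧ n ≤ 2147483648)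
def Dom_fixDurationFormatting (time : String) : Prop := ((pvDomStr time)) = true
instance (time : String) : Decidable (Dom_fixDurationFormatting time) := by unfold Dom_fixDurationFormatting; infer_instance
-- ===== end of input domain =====

-- B replaces A's reverse/index-loop/fill/re-reverse construction by one slice of the last 11
-- characters right-justified against the constant template "00:00:00.00" (objective: simpler).

-- ===== PORT A =====
-- inner loop: 'for j in range(i, len(out)): if out[j] == "": out[j] = "0"'
def fixFillLoop (out : List String) (j : Nat) : List String :=
  if h : j < out.length then
    fixFillLoop (if out[j] = "" then out.set j "0" else out) (j + 1)
  else out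
termination_by out.length - j
decreasing_by split <;> (try simp only [List.length_set]) <;> omega

-- outer loop: 'for i in range(len(out)): if i >= len(t): <fill>; break; out[i] = t[i]'
def fixMainLoop (t : List Char) (out : List String) (i : Nat) : List String :=
  if h : i < out.length then
    if t.length ≤ i then fixFillLoop out i   -- the fill-then-break branch
    else fixMainLoop t (out.set i (String.ofList [t.getD i ' '])) (i + 1)  -- i < t.length here, so t[i] = t.getD i _
  else out
termination_by out.length - i
decreasing_by simp only [List.length_set]; omega

def fixDurationFormatting (time : String) : String :=
  let t := time.toList.reverse
  let out := ([ "", "", ":", "", "", ":", "", "", ".", "", "" ] : List String).reverse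
  PySem.Str.join "" (fixMainLoop t out 0).reverse

-- ===== PORT B =====
def fixDurationFormatting_alt (time : String) : String :=
  let s := PySem.Str.slice time (some (-11)) none
  PySem.Str.slice "00:00:00.00" none (some (11 - PySem.Str.len s)) ++ s

-- ===== PRECONDITION & SPEC =====
def Spec_fixDurationFormatting (time : String) (out : String) : Prop := out = fixDurationFormatting_alt time
instance (time : String) (out : String) : Decidable (Spec_fixDurationFormatting time out) := by unfold Spec_fixDurationFormatting; infer_instance

-- ===== CLAIM (what is proved, stated in full; the proofs are below) =====
def Claim_equal_fixDurationFormatting : Prop := ∀ (time : String), Dom_fixDurationFormatting time → Spec_fixDurationFormatting time (fixDurationFormatting time)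

-- ===== LEMMAS AND PROOFS =====

-- the template "00:00:00.00" as chars, and reversed
def fixTmplC : List Char := ['0','0',':','0','0',':','0','0','.','0','0']
def fixTmplRC : List Char := ['0','0','.','0','0',':','0','0',':','0','0']

-- the character A's loop leaves (reading the reversed output) at reversed position k
def fixGChar (r : List Char) (k : Nat) : Char :=
  if k < r.length then r.getD k ' ' else fixTmplRC.getD k ' '

theorem fixFillLoop_getElem?_aux (n : Nat) : ∀ (out : List String) (j k : Nat), out.length ≤ j + n →
    (fixFillLoop out j)[k]? = if j ≤ k ∧ out[k]? = some "" then some "0" else out[k]? := by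
  induction n with
  | zero =>
    intro out j k hn
    rw [fixFillLoop, dif_neg (by omega)]
    by_cases hjk : j ≤ k
    · have hnone : out[k]? = none := List.getElem?_eq_none (by omega)
      simp [hnone]
    · rw [if_neg (by tauto)]
  | succ n ih =>
    intro out j k hn
    rw [fixFillLoop]
    by_cases h : j < out.length
    · rw [dif_pos h]
      rw [ih _ (j+1) k (by split <;> (try simp only [List.length_set]) <;> omega)]
      by_cases hjk : j = k
      · subst hjk
        by_cases he : out[j]'h = "" <;>
          simp [he, List.getElem?_set, List.getElem?_eq_getElem h,
            show ¬ (j+1 ≤ j) by omega, h]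
      · have hiff : (j+1 ≤ k) ↔ (j ≤ k) := by omega
        by_cases he : out[j]'h = "" <;>
          simp [he, List.getElem?_set, hjk, hiff]
    · rw [dif_neg h]
      by_cases hjk : j ≤ k
      · have hnone : out[k]? = none := List.getElem?_eq_none (by omega)
        simp [hnone]
      · rw [if_neg (by tauto)]

theorem fixFillLoop_getElem? (out : List String) (j k : Nat) :
    (fixFillLoop out j)[k]? = if j ≤ k ∧ out[k]? = some "" then some "0" else out[k]? :=
  fixFillLoop_getElem?_aux out.length out j k (by omega)

theorem fixMainLoop_getElem?_aux (n : Nat) : ∀ (t : List Char) (out : List String) (i k : Nat),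
    out.length ≤ i + n →
    (fixMainLoop t out i)[k]? =
      if k < i then out[k]?
      else if k < t.length ∧ k < out.length then some (String.ofList [t.getD k ' '])
      else if out[k]? = some "" then some "0" else out[k]? := by
  induction n with
  | zero =>
    intro t out i k hn
    rw [fixMainLoop, dif_neg (by omega)]
    by_cases hk : k < i
    · simp [hk]
    · have hlen : ¬ k < out.length := by omega
      have hnone : out[k]? = none := List.getElem?_eq_none (by omega)
      simp [hk, hlen, hnone]
  | succ n ih =>
    intro t out i k hn
    rw [fixMainLoop]
    by_cases h : i < out.length
    · rw [dif_pos h]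
      by_cases hb : t.length ≤ i
      · rw [if_pos hb, fixFillLoop_getElem?]
        by_cases hk : k < i
        · simp [hk, show ¬ i ≤ k by omega]
        · have h2 : ¬ (k < t.length ∧ k < out.length) := by
            rintro ⟨a, _⟩; omega
          simp [hk, h2, show i ≤ k by omega]
      · rw [if_neg hb, ih t _ (i+1) k (by simp only [List.length_set]; omega)]
        by_cases hk : k < i + 1
        · by_cases hk2 : k < i
          · simp [hk, hk2, List.getElem?_set, show ¬ i = k by omega]
          · have hki : k = i := by omega
            subst hki
            simp [hk, hk2, List.getElem?_set, h, show k < t.length by omega]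
        · have hki : ¬ k < i := by omega
          simp [hk, hki, List.getElem?_set, show ¬ i = k by omega, List.length_set]
    · rw [dif_neg h]
      by_cases hk : k < i
      · simp [hk]
      · have hlen : ¬ k < out.length := by omega
        have hnone : out[k]? = none := List.getElem?_eq_none (by omega)
        simp [hk, hlen, hnone]

theorem fixMainLoop_getElem? (t : List Char) (out : List String) (i k : Nat) :
    (fixMainLoop t out i)[k]? =
      if k < i then out[k]?
      else if k < t.length ∧ k < out.length then some (String.ofList [t.getD k ' '])
      else if out[k]? = some "" then some "0" else out[k]? :=
  fixMainLoop_getElem?_aux out.length t out i k (by omega)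

-- the final out list is 11 single-character strings, read via fixGChar
theorem fixOutF_eq (r : List Char) :
    fixMainLoop r (([ "", "", ":", "", "", ":", "", "", ".", "", "" ] : List String).reverse) 0
      = (List.range 11).map (fun k => String.ofList [fixGChar r k]) := by
  apply List.ext_getElem?
  intro i
  rw [fixMainLoop_getElem?]
  by_cases hi : i < 11
  · by_cases hr : i < r.length
    · simp [hr, hi, fixGChar]
    · simp only [if_neg (by omega : ¬ i < 0)]
      rw [if_neg (by rintro ⟨a, _⟩; omega)]
      interval_cases i <;> simp [fixGChar, hr, List.getElem?_range] <;> rfl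
  · have h1 : (([ "", "", ":", "", "", ":", "", "", ".", "", "" ] : List String).reverse)[i]? = none :=
      List.getElem?_eq_none (by simp; omega)
    have h2 : ((List.range 11).map (fun k => String.ofList [fixGChar r k]))[i]? = none :=
      List.getElem?_eq_none (by simp; omega)
    simp [h1, h2, hi]

theorem fixA_toList (time : String) :
    (fixDurationFormatting time).toList
      = (List.range 11).reverse.map (fixGChar time.toList.reverse) := by
  show (PySem.Str.join "" (fixMainLoop time.toList.reverse
      (([ "", "", ":", "", "", ":", "", "", ".", "", "" ] : List String).reverse) 0).reverse).toList
    = (List.range 11).reverse.map (fixGChar time.toList.reverse)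
  rw [fixOutF_eq, PySem.Str.toList_join]
  rw [← List.map_reverse, List.map_map]
  have h1 : (String.toList ∘ fun k => String.ofList [fixGChar time.toList.reverse k])
      = fun k => [fixGChar time.toList.reverse k] := by
    funext k; simp
  rw [h1, show "".toList = ([] : List Char) from rfl]
  have h2 : ∀ (ks : List Nat), PySem.Chars.join ([] : List Char) (ks.map (fun k => [fixGChar time.toList.reverse k]))
      = ks.map (fixGChar time.toList.reverse) := by
    intro ks
    induction ks with
    | nil => rfl
    | cons a as ihx =>
      cases as with
      | nil => rfl
      | cons b bs =>
        rw [List.map_cons, List.map_cons] at ihx ⊢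
        rw [PySem.Chars.join_cons_cons]
        simp [ihx]
  exact h2 _

theorem fixB_toList (time : String) :
    (fixDurationFormatting_alt time).toList
      = fixTmplC.take (11 - (time.toList.drop (time.toList.length - 11)).length)
        ++ time.toList.drop (time.toList.length - 11) := by
  unfold fixDurationFormatting_alt
  have hS : (PySem.Str.slice time (some (-11)) none).toList
      = time.toList.drop (time.toList.length - 11) := by
    rw [PySem.Str.toList_slice, PySem.Chars.slice_eq_listSlice,
      PySem.List.slice_from_neg_ofNat _ 11 (by norm_num)]
  have hm : (time.toList.drop (time.toList.length - 11)).length ≤ 11 := by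
    simp [List.length_drop]; omega
  have hlen : PySem.Str.len (PySem.Str.slice time (some (-11)) none)
      = ((time.toList.drop (time.toList.length - 11)).length : Int) := by
    rw [PySem.Str.len_eq, hS]
  simp only [String.toList_append, hS, hlen]
  rw [PySem.Str.toList_slice, PySem.Chars.slice_eq_listSlice,
    PySem.List.slice_to _ (by omega)]
  congr 1
  · have ht : ((11 : Int) - ((time.toList.drop (time.toList.length - 11)).length : Int)).toNat
        = 11 - (time.toList.drop (time.toList.length - 11)).length := by omega
    rw [ht]
    rfl

theorem fixRange_map_getD (r : List Char) :
    (List.range r.length).map (fun k => r.getD k ' ') = r := by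
  apply List.ext_getElem
  · simp
  · intro j h1 h2
    simp [List.getD_eq_getElem?_getD, List.getElem?_eq_getElem h2]

theorem fixMain_chars (l : List Char) :
    (List.range 11).reverse.map (fixGChar l.reverse)
      = fixTmplC.take (11 - (l.drop (l.length - 11)).length) ++ l.drop (l.length - 11) := by
  rcases Nat.lt_or_ge l.length 11 with h | h
  · -- short input: everything is kept, padded from the template
    have h0 : l.length - 11 = 0 := by omega
    rw [h0, List.drop_zero]
    rw [show (11:Nat) = l.length + (11 - l.length) by omega, List.range_add]
    rw [List.reverse_append, List.map_append]
    congr 1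
    · -- template part
      rw [← List.map_reverse, List.map_map]
      rw [List.map_congr_left (g := fun k => fixTmplRC.getD (l.length + k) ' ')
        (by intro k hk
            simp only [Function.comp_apply, fixGChar, List.length_reverse]
            rw [if_neg (by omega)])]
      rw [List.map_reverse]
      have hn : l.length < 11 := by omega
      set n := l.length with hndef
      clear_value n
      interval_cases n <;> decide
    · -- data part
      have hmc : List.map (fixGChar l.reverse) (List.range l.length)
          = List.map (fun k => l.reverse.getD k ' ') (List.range l.length) :=
        List.map_congr_left (by
          intro k hk
          simp only [List.mem_range] at hk
          exact if_pos (by simp; omega))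
      rw [List.map_reverse, hmc]
      rw [show l.length = l.reverse.length by simp, fixRange_map_getD, List.reverse_reverse]
  · -- long input: the template prefix is empty and the answer is the last 11 characters
    have hm11 : (l.drop (l.length - 11)).length = 11 := by simp [List.length_drop]; omega
    rw [hm11]
    simp only [Nat.sub_self, List.take_zero, List.nil_append]
    apply List.ext_getElem
    · simp [List.length_drop]; omega
    · intro j h1 h2
      simp only [List.getElem_map, List.getElem_reverse, List.getElem_range,
        List.length_map, List.length_reverse, List.length_range] at h1 ⊢
      simp only [fixGChar]
      rw [if_pos (by simp; omega)]
      rw [List.getD_eq_getElem _ _ (by simp; omega), List.getElem_reverse, List.getElem_drop]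
      congr 1
      omega

-- ===== VERDICT (by name: the statement is the Claim_ definition above) =====
theorem fixDurationFormatting_spec : Claim_equal_fixDurationFormatting := by
  intro time _
  unfold Spec_fixDurationFormatting
  refine String.toList_inj.mp ?_
  rw [fixA_toList, fixB_toList]
  exact fixMain_chars time.toList
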